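-- pv_equiv track=rewrite | github.com/dknos/web-novel-static-generator-GUI | generator/modules/glossary.py | group_terms_by_category
-- ===== SOURCE A (Python) =====
-- def group_terms_by_category(glossary_data):
--     """Group glossary terms by category for display.
--
--     Returns:
--         OrderedDict of category -> list of term entries
--     """
--     if not glossary_data or not glossary_data.get('terms'):
--         return {}
--
--     groups = {}
--     for term in glossary_data['terms']:
--         category = term.get('category', 'general')
--         if category not in groups:
--             groups[category] = []
--         groups[category].append(term)
--
--     # Sort each group by term name
--     for category in groups:
--         groups[category].sort(key=lambda t: t.get('term', '').lower())
--
--     return groups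
-- ===== SOURCE B (Python) =====
-- def group_terms_by_category(glossary_data):
--     """Group glossary terms by category for display.
--
--     Recursive decomposition: peel off the first remaining term's category,
--     sort that category's terms, and recurse on the terms of the other
--     categories (no mutable dict of growing lists, no in-place sorting).
--     """
--     terms = glossary_data.get('terms') if glossary_data else None
--     if not terms:
--         return {}
--
--     def rec(ts):
--         if not ts:
--             return {}
--         c = ts[0].get('category', 'general')
--         out = {c: sorted([t for t in ts if t.get('category', 'general') == c],
--                          key=lambda t: t.get('term', '').lower())}
--         out.update(rec([t for t in ts if t.get('category', 'general') != c]))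
--         return out
--
--     return rec(terms)
-- ===== Notes on version B (the rewrite author's own statement) =====
-- stated objective: alternative
-- what changed: B replaces A's dict-of-growing-lists pass plus in-place per-group sorting with a recursive peel-off: take the first remaining term's category, sort that category's terms, and recurse on the rest.
import Mathlib
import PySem

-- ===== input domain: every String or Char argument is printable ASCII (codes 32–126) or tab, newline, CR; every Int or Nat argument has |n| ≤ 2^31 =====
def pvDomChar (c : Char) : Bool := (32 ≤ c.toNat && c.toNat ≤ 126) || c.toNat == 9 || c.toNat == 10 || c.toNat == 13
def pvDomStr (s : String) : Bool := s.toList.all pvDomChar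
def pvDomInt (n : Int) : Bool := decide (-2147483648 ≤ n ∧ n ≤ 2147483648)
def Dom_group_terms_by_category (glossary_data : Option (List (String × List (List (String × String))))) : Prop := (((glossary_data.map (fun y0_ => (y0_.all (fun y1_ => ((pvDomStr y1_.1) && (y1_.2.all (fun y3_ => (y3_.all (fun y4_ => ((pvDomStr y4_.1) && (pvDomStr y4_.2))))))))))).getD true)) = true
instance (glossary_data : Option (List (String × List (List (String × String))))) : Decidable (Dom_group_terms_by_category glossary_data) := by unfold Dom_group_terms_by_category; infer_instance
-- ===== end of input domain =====

-- B groups recursively: peel off the first remaining term's category, sort that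
-- category's terms, recurse on the rest (alternative decomposition vs A's mutable
-- dict of growing lists sorted in place afterwards); same cost class, no speed claim.


-- ===== PORT A =====
-- term.get('category', 'general')
def pvCat (t : List (String × String)) : String :=
  (PySem.Dict.mk t).getD "category" "general"

-- lambda t: t.get('term', '').lower()
def pvTermKey (t : List (String × String)) : String :=
  PySem.Str.lower ((PySem.Dict.mk t).getD "term" "")

-- body of A's grouping loop: if category not in groups: groups[category] = [];
-- groups[category].append(term)  (append = overwrite the entry with value ++ [term])
def pvStepA (g : PySem.Dict String (List (List (String × String))))
    (term : List (String × String)) : PySem.Dict String (List (List (String × String))) :=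
  let category := pvCat term
  let g1 := if g.contains category then g else g.insert category []
  g1.insert category (g1.getD category [] ++ [term])

def group_terms_by_category (glossary_data : Option (List (String × List (List (String × String))))) : List (String × List (List (String × String))) :=
  match glossary_data with
  | none => []
  | some d =>
    if d = [] then []
    else
      match (PySem.Dict.mk d).get? "terms" with
      | none => []
      | some terms =>
        if terms = [] then []
        else
          let groups := terms.foldl pvStepA PySem.Dict.empty
          groups.items.map (fun pr => (pr.1, PySem.List.sorted pr.2 pvTermKey))

-- ===== PORT B =====
-- rec(ts): {} for empty; else the first term's category with its sorted terms,
-- followed by rec on the terms of the other categories.  out.update(rec(rest)) is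
-- a plain append of entries here because category c never occurs in rest.
def pvGroupRec : List (List (String × String)) → List (String × List (List (String × String)))
  | [] => []
  | t :: ts =>
    let c := pvCat t
    (c, PySem.List.sorted ((t :: ts).filter (fun x => pvCat x == c)) pvTermKey)
      :: pvGroupRec (ts.filter (fun x => pvCat x != c))
termination_by ts => ts.length
decreasing_by
  simp only [List.length_cons, List.length_unattach]
  exact Nat.lt_succ_of_le (le_trans (List.length_filter_le _ _) (by simp))

def group_terms_by_category_alt (glossary_data : Option (List (String × List (List (String × String))))) : List (String × List (List (String × String))) :=
  -- terms = glossary_data.get('terms') if glossary_data else None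
  let terms? : Option (List (List (String × String))) :=
    match glossary_data with
    | none => none
    | some d => if d = [] then none else (PySem.Dict.mk d).get? "terms"
  -- if not terms: return {}  /  return rec(terms)
  match terms? with
  | none => []
  | some [] => []
  | some ts => pvGroupRec ts

-- ===== PRECONDITION & SPEC =====
def Spec_group_terms_by_category (glossary_data : Option (List (String × List (List (String × String))))) (out : List (String × List (List (String × String)))) : Prop := out = group_terms_by_category_alt glossary_data
instance (glossary_data : Option (List (String × List (List (String × String))))) (out : List (String × List (List (String × String)))) : Decidable (Spec_group_terms_by_category glossary_data out) := by unfold Spec_group_terms_by_category; infer_instance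

-- ===== CLAIM (what is proved, stated in full; the proofs are below) =====
def Claim_equal_group_terms_by_category : Prop := ∀ (glossary_data : Option (List (String × List (List (String × String))))), Dom_group_terms_by_category glossary_data → Spec_group_terms_by_category glossary_data (group_terms_by_category glossary_data)

-- ===== LEMMAS AND PROOFS =====

-- first-appearance category order of a prefix (proof-side characterisation)
def pvStepCat (acc : List String) (t : List (String × String)) : List String :=
  let c := pvCat t
  if acc.contains c then acc else acc ++ [c]

-- the association list A's dict holds after processing prefix p, given that the
-- distinct categories of p (in first-appearance order) are cs
def pvShape (cs : List String) (p : List (List (String × String))) :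
    List (String × List (List (String × String))) :=
  cs.map (fun c => (c, p.filter (fun t => pvCat t == c)))

theorem pvGet?_shape (cs : List String) (p : List (List (String × String))) (k : String) :
    (PySem.Dict.mk (pvShape cs p)).get? k =
      if cs.contains k then some (p.filter (fun t => pvCat t == k)) else none := by
  induction cs with
  | nil => simp [pvShape, PySem.Dict.get?]
  | cons c cs ih =>
    simp only [pvShape, List.map_cons] at *
    rw [PySem.Dict.get?_mk_cons]
    by_cases h : c = k
    · subst h; simp
    · simp [ih, h, Ne.symm h]

theorem pvContains_shape (cs : List String) (p : List (List (String × String))) (k : String) :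
    (PySem.Dict.mk (pvShape cs p)).contains k = cs.contains k := by
  have hg := pvGet?_shape cs p k
  by_cases h : k ∈ cs <;>
    simp [PySem.Dict.contains_eq_isSome_get?, hg, h]

theorem pvInsert_shape (cs : List String) (p : List (List (String × String)))
    (t : List (String × String)) (h : cs.contains (pvCat t) = true) :
    (PySem.Dict.mk (pvShape cs p)).insert (pvCat t)
        (p.filter (fun x => pvCat x == pvCat t) ++ [t]) =
      PySem.Dict.mk (pvShape cs (p ++ [t])) := by
  rw [PySem.Dict.insert, pvContains_shape, h, if_pos rfl]
  congr 1
  simp only [pvShape, List.map_map]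
  refine List.map_congr_left (fun c hc => ?_)
  by_cases hck : c = pvCat t
  · subst hck; simp [List.filter_append]
  · simp [Function.comp, hck, List.filter_append, Ne.symm hck]

theorem pvStepA_shape (cs : List String) (p : List (List (String × String)))
    (t : List (String × String)) (hp : ∀ x ∈ p, cs.contains (pvCat x) = true) :
    pvStepA (PySem.Dict.mk (pvShape cs p)) t =
      PySem.Dict.mk (pvShape (pvStepCat cs t) (p ++ [t])) := by
  rw [pvStepA, pvStepCat]
  by_cases h : cs.contains (pvCat t)
  · simp only [pvContains_shape, h, if_pos]
    have hg : (PySem.Dict.mk (pvShape cs p)).getD (pvCat t) [] =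
        p.filter (fun x => pvCat x == pvCat t) := by
      rw [PySem.Dict.getD, pvGet?_shape, if_pos h]; rfl
    rw [hg, pvInsert_shape cs p t h]
  · -- new category: the [] entry is appended, then overwritten with [t]
    have hnil : p.filter (fun x => pvCat x == pvCat t) = [] := by
      rw [List.filter_eq_nil_iff]
      intro x hx hbeq
      have hcx := hp x hx
      rw [show pvCat x = pvCat t from beq_iff_eq.mp hbeq] at hcx
      exact h hcx
    have h1 : (PySem.Dict.mk (pvShape cs p)).insert (pvCat t) [] =
        PySem.Dict.mk (pvShape (cs ++ [pvCat t]) p) := by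
      rw [PySem.Dict.insert, pvContains_shape]
      simp only [h, Bool.false_eq_true, if_false]
      congr 1
      simp [pvShape, hnil]
    simp only [pvContains_shape, h, Bool.false_eq_true, if_false, h1]
    have h2 : (cs ++ [pvCat t]).contains (pvCat t) = true := by simp
    have hg : (PySem.Dict.mk (pvShape (cs ++ [pvCat t]) p)).getD (pvCat t) [] =
        p.filter (fun x => pvCat x == pvCat t) := by
      rw [PySem.Dict.getD, pvGet?_shape, if_pos h2]; rfl
    rw [hg, pvInsert_shape (cs ++ [pvCat t]) p t h2]

theorem pvFoldl_shape (ts : List (List (String × String))) :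
    ∀ (cs : List String) (p : List (List (String × String))),
      (∀ x ∈ p, cs.contains (pvCat x) = true) →
      ts.foldl pvStepA (PySem.Dict.mk (pvShape cs p)) =
        PySem.Dict.mk (pvShape (ts.foldl pvStepCat cs) (p ++ ts)) := by
  induction ts with
  | nil => intro cs p _; simp
  | cons t ts ih =>
    intro cs p hp
    rw [List.foldl_cons, List.foldl_cons, pvStepA_shape cs p t hp]
    rw [ih (pvStepCat cs t) (p ++ [t]) ?_]
    · simp
    · intro x hx
      rcases List.mem_append.mp hx with hx | hx
      · have hcx := hp x hx
        simp only [pvStepCat]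
        split
        · exact hcx
        · simp only [List.contains_eq_mem, decide_eq_true_eq] at hcx ⊢
          exact List.mem_append.mpr (Or.inl hcx)
      · simp only [List.mem_singleton] at hx
        subst hx
        simp only [pvStepCat]
        split
        · assumption
        · simp

-- terms whose category is already recorded do not change the category fold
theorem pvFoldCat_append (ts : List (List (String × String))) :
    ∀ (a cs : List String),
      ts.foldl pvStepCat (a ++ cs) =
        a ++ (ts.filter (fun x => a.contains (pvCat x) = false)).foldl pvStepCat cs := by
  induction ts with
  | nil => intro a cs; simp
  | cons t ts ih =>
    intro a cs
    rw [List.foldl_cons]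
    by_cases h : a.contains (pvCat t)
    · have hstep : pvStepCat (a ++ cs) t = a ++ cs := by
        simp only [pvStepCat]
        rw [if_pos]
        simp only [List.contains_append, h, Bool.true_or]
      rw [hstep, ih a cs, List.filter_cons]
      have h' : pvCat t ∈ a := by simpa [List.contains_eq_mem] using h
      simp [h']
    · have hm : pvCat t ∉ a := by simpa [List.contains_eq_mem] using h
      have hc : (a ++ cs).contains (pvCat t) = cs.contains (pvCat t) := by
        simp [List.contains_eq_mem, List.mem_append, hm]
      have hstep : pvStepCat (a ++ cs) t = a ++ pvStepCat cs t := by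
        simp only [pvStepCat, hc]
        split
        · rfl
        · rw [List.append_assoc]
      rw [hstep, ih a (pvStepCat cs t), List.filter_cons]
      have h' : pvCat t ∉ a := by simpa [List.contains_eq_mem] using h
      simp [h']

-- every recorded category comes from the accumulator or some term
theorem pvMem_foldCat (ts : List (List (String × String))) :
    ∀ (cs : List String) (c : String), c ∈ ts.foldl pvStepCat cs →
      c ∈ cs ∨ ∃ x ∈ ts, pvCat x = c := by
  induction ts with
  | nil => intro cs c h; exact Or.inl h
  | cons t ts ih =>
    intro cs c h
    rw [List.foldl_cons] at h
    rcases ih (pvStepCat cs t) c h with h1 | h1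
    · simp only [pvStepCat] at h1
      split at h1
      · exact Or.inl h1
      · rcases List.mem_append.mp h1 with h2 | h2
        · exact Or.inl h2
        · simp only [List.mem_singleton] at h2
          exact Or.inr ⟨t, by simp, h2.symm⟩
    · rcases h1 with ⟨x, hx, hc⟩
      exact Or.inr ⟨x, by simp [hx], hc⟩

-- B's recursion computes the first-appearance categories with their sorted groups
theorem pvGroupRec_eq_aux : ∀ (n : Nat) (ts : List (List (String × String))), ts.length ≤ n →
    pvGroupRec ts = (ts.foldl pvStepCat []).map
      (fun c => (c, PySem.List.sorted (ts.filter (fun x => pvCat x == c)) pvTermKey)) := by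
  intro n
  induction n with
  | zero =>
    intro ts h
    rw [Nat.le_zero, List.length_eq_zero_iff] at h
    subst h; simp [pvGroupRec]
  | succ n ih =>
    intro ts h
    cases ts with
    | nil => simp [pvGroupRec]
    | cons t ts =>
      rw [pvGroupRec]
      have hrest : ts.filter (fun x => decide ([pvCat t].contains (pvCat x) = false)) =
          ts.filter (fun x => pvCat x != pvCat t) := by
        refine List.filter_congr (fun x _ => ?_)
        simp only [List.contains_cons, List.contains_nil, Bool.or_false]
        cases hbe : (pvCat x == pvCat t) <;> simp [bne, hbe]
      have hfold : (t :: ts).foldl pvStepCat [] =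
          pvCat t :: (ts.filter (fun x => pvCat x != pvCat t)).foldl pvStepCat [] := by
        rw [List.foldl_cons]
        have h0 : pvStepCat [] t = [pvCat t] := by simp [pvStepCat]
        rw [h0, show ([pvCat t] : List String) = [pvCat t] ++ [] from rfl,
          pvFoldCat_append, hrest]
        rfl
      have hlen : (ts.filter (fun x => pvCat x != pvCat t)).length ≤ n := by
        have := List.length_filter_le (fun x => pvCat x != pvCat t) ts
        simp only [List.length_cons, Nat.succ_le_succ_iff] at h
        omega
      rw [hfold, List.map_cons, ih _ hlen]
      congr 1
      refine List.map_congr_left (fun c' hc' => ?_)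
      have hne : c' ≠ pvCat t := by
        rcases pvMem_foldCat _ [] c' hc' with h1 | ⟨x, hx, hcx⟩
        · simp at h1
        · have hxm := List.of_mem_filter hx
          simp only [bne_iff_ne, ne_eq] at hxm
          rw [← hcx]
          exact hxm
      have hfull : (t :: ts).filter (fun x => pvCat x == c') =
          ts.filter (fun x => pvCat x == c') := by
        rw [List.filter_cons]
        simp [Ne.symm hne]
      have hsub : (ts.filter (fun x => pvCat x != pvCat t)).filter (fun x => pvCat x == c') =
          ts.filter (fun x => pvCat x == c') := by
        rw [List.filter_filter]
        refine List.filter_congr (fun x _ => ?_)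
        by_cases hx : pvCat x = c'
        · simp [hx, hne]
        · simp [hx]
      rw [hfull, hsub]

theorem pvGroupRec_eq (ts : List (List (String × String))) :
    pvGroupRec ts = (ts.foldl pvStepCat []).map
      (fun c => (c, PySem.List.sorted (ts.filter (fun x => pvCat x == c)) pvTermKey)) :=
  pvGroupRec_eq_aux ts.length ts (Nat.le_refl _)

-- ===== VERDICT (by name: the statement is the Claim_ definition above) =====
theorem group_terms_by_category_spec : Claim_equal_group_terms_by_category := by
  intro gd _
  unfold Spec_group_terms_by_category group_terms_by_category group_terms_by_category_alt
  cases gd with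
  | none => rfl
  | some d =>
    by_cases hd : d = []
    · simp [hd]
    · simp only [hd, if_false]
      cases hterms : (PySem.Dict.mk d).get? "terms" with
      | none => rfl
      | some terms =>
        cases terms with
        | nil => simp
        | cons t ts =>
          simp only [reduceCtorEq, if_false]
          rw [pvGroupRec_eq (t :: ts)]
          have h0 : (PySem.Dict.empty : PySem.Dict String (List (List (String × String)))) =
              PySem.Dict.mk (pvShape [] []) := by simp [PySem.Dict.empty, pvShape]
          rw [h0, pvFoldl_shape (t :: ts) [] [] (by simp)]
          simp [pvShape, List.map_map, Function.comp]
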